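-- pv_equiv track=rewrite | github.com/krzyssikora/advent_of_code | aoc_2021/20_2_trench_map.py | change_string_into_number
-- ===== SOURCE A (Python) =====
-- def change_string_into_number(pixel_string):
--     binary_string = ""
--     for character in pixel_string:
--         if character == "#":
--             binary_string += "1"
--         elif character == ".":
--             binary_string += "0"
--     return int(binary_string, 2)
-- ===== SOURCE B (Python) =====
-- def change_string_into_number(pixel_string):
--     number = 0
--     for character in pixel_string:
--         if character == "#":
--             number = number * 2 + 1
--         elif character == ".":
--             number = number * 2
--     return number
-- ===== Notes on version B (the rewrite author's own statement) =====
-- stated objective: simpler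
-- what changed: B accumulates the value directly with Horner's rule (number = 2*number + bit) in one pass, instead of building an intermediate binary string and parsing it with int(_, 2).
-- outside the precondition, e.g. on change_string_into_number(''): A raises ValueError, B returns 0
import Mathlib
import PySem

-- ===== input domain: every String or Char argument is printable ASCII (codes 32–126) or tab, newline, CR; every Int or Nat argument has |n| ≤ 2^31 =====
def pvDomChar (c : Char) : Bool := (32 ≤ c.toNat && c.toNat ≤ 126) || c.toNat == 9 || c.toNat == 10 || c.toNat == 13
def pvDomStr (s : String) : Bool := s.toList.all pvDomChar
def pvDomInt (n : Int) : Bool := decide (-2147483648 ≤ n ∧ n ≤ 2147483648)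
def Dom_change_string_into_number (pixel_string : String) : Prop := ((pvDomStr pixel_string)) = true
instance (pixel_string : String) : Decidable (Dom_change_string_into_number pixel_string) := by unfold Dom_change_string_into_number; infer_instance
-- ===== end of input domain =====

-- B replaces A's build-a-binary-string-then-int(_,2) with a one-pass Horner accumulator (simpler; return value only).

-- ===== PORT A =====
-- Hand port of int(binary_string, 2), exact on the strings A's loop builds: nonempty
-- sequences of '0'/'1' only (no sign, whitespace, prefix or underscores). On the empty
-- string Python's int('', 2) raises ValueError; Pre_ excludes exactly those inputs.
def pvParseBin (cs : List Char) : Int :=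
  cs.foldl (fun a c => 2 * a + (if c = '1' then 1 else 0)) 0

def change_string_into_number (pixel_string : String) : Int :=
  let binary_string : List Char :=
    pixel_string.toList.foldl
      (fun b c => if c = '#' then b ++ ['1'] else if c = '.' then b ++ ['0'] else b) []
  pvParseBin binary_string

-- ===== PORT B =====
def change_string_into_number_alt (pixel_string : String) : Int :=
  pixel_string.toList.foldl
    (fun number c =>
      if c = '#' then number * 2 + 1
      else if c = '.' then number * 2
      else number) 0

-- ===== PRECONDITION & SPEC =====
-- Pre_ excludes exactly the strings containing neither pixel character (hash nor dot), on which A raises ValueError (int of empty string).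
def Pre_change_string_into_number (pixel_string : String) : Prop :=
  (pixel_string.toList.any (fun c => c == '#' || c == '.')) = true
instance (pixel_string : String) : Decidable (Pre_change_string_into_number pixel_string) := by
  unfold Pre_change_string_into_number; infer_instance

def pvWitness_change_string_into_number : String := "#..#"

def Spec_change_string_into_number (pixel_string : String) (out : Int) : Prop :=
  out = change_string_into_number_alt pixel_string
instance (pixel_string : String) (out : Int) : Decidable (Spec_change_string_into_number pixel_string out) := by
  unfold Spec_change_string_into_number; infer_instance

-- ===== CLAIM (what is proved, stated in full; the proofs are below) =====
def Claim_equal_change_string_into_number : Prop :=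
  ∀ (pixel_string : String), Dom_change_string_into_number pixel_string →
    Pre_change_string_into_number pixel_string →
    Spec_change_string_into_number pixel_string (change_string_into_number pixel_string)


-- ===== LEMMAS AND PROOFS =====

lemma pvParseBin_snoc (b : List Char) (d : Char) :
    pvParseBin (b ++ [d]) = 2 * pvParseBin b + (if d = '1' then 1 else 0) := by
  simp [pvParseBin, List.foldl_append]

-- Loop invariant: parsing the string built by A's loop equals B's Horner accumulator.
lemma horner_invariant (cs : List Char) (b : List Char) :
    pvParseBin (cs.foldl
      (fun b c => if c = '#' then b ++ ['1'] else if c = '.' then b ++ ['0'] else b) b)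
    = cs.foldl
      (fun number c =>
        if c = '#' then number * 2 + 1
        else if c = '.' then number * 2
        else number) (pvParseBin b) := by
  induction cs generalizing b with
  | nil => rfl
  | cons c cs ih =>
    simp only [List.foldl_cons]
    by_cases h1 : c = '#'
    · simp [h1, ih, pvParseBin_snoc]; ring_nf
    · by_cases h2 : c = '.'
      · simp [h2, ih, pvParseBin_snoc]; ring_nf
      · simp [h1, h2, ih]

-- ===== VERDICT (by name: the statement is the Claim_ definition above) =====
theorem change_string_into_number_spec : Claim_equal_change_string_into_number := by
  intro s _ _
  unfold Spec_change_string_into_number change_string_into_number change_string_into_number_alt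
  simpa [pvParseBin] using horner_invariant s.toList []
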